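-- pv_equiv track=rewrite | github.com/clarkandrew/SubGraphPlus | src/app/utils.py | extract_query_entities
-- ===== SOURCE A (Python) =====
-- from typing import List, Dict, Tuple, Optional, Set, Any, Union
--
-- def extract_query_entities(query: str) -> List[str]:
--     """Extract potential entity mentions from a query"""
--     # This is a simplified implementation
--     # In a production system, we would use NER models
--
--     # Split query into words
--     words = query.split()
--
--     # Extract capitalized multi-word entities (naive approach)
--     entities = []
--     current_entity = []
--
--     for word in words:
--         if word[0].isupper():
--             current_entity.append(word)
--         else:
--             if current_entity:
--                 entities.append(" ".join(current_entity))
--                 current_entity = []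
--
--     # Don't forget the last entity
--     if current_entity:
--         entities.append(" ".join(current_entity))
--
--     return entities
-- ===== SOURCE B (Python) =====
-- def extract_query_entities(query):
--     """Extract potential entity mentions from a query (two-pointer run scan)."""
--     words = query.split()
--     out = []
--     i, n = 0, len(words)
--     while i < n:
--         j = i
--         while j < n and words[j][0].isupper():
--             j += 1
--         if j > i:
--             out.append(" ".join(words[i:j]))
--             i = j
--         else:
--             i += 1
--     return out
-- ===== Notes on version B (the rewrite author's own statement) =====
-- stated objective: alternative
-- what changed: Replaces A's accumulator-and-flush loop by a two-pointer scan that finds each maximal run of capitalized words and joins the slice directly, with no current_entity buffer and no trailing flush.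
import Mathlib
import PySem

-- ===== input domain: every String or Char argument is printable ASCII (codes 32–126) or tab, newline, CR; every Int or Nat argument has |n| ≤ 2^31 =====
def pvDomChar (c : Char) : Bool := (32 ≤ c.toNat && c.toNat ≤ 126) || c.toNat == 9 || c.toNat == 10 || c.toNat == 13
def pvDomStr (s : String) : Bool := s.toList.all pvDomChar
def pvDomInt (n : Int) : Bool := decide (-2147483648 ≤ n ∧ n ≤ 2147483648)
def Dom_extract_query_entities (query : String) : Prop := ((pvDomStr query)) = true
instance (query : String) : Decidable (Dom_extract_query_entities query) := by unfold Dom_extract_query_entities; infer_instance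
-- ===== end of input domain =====

-- B replaces A's accumulator-and-flush loop by a two-pointer scan over maximal
-- capitalized runs (objective: alternative structure, same cost).

-- word[0].isupper() (split words are nonempty, so the getD default is never used)
def pvUpperFirst (w : String) : Bool :=
  ((PySem.Str.pyGet? w 0).map PySem.Chars.isupper).getD false

-- ===== PORT A =====
-- the for-loop of A, state (entities, current_entity)
def pvALoop : List String → List String → List String → (List String × List String)
  | [], ents, cur => (ents, cur)
  | w :: ws, ents, cur =>
    if pvUpperFirst w then pvALoop ws ents (cur ++ [w])
    else if cur ≠ [] then pvALoop ws (ents ++ [PySem.Str.join " " cur]) []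
    else pvALoop ws ents cur

def extract_query_entities (query : String) : List String :=
  let words := PySem.Str.split₀ query
  let p := pvALoop words [] []
  if p.2 ≠ [] then p.1 ++ [PySem.Str.join " " p.2] else p.1

-- ===== PORT B =====
-- inner while of Source B: advance j while j < n and words[j][0].isupper()
def pvRunEnd (words : List String) (n : Nat) (j : Nat) : Nat :=
  if j < n ∧ pvUpperFirst (words.getD j "") then pvRunEnd words n (j + 1) else j
termination_by n - j
decreasing_by omega

-- outer while of Source B over index i, appending joined slices to out
def pvBLoop (words : List String) (n : Nat) (i : Nat) (out : List String) : List String :=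
  if _h : i < n then
    let j := pvRunEnd words n i
    if hj : i < j then
      pvBLoop words n j (out ++ [PySem.Str.join " " (PySem.List.slice words (some (i : Int)) (some (j : Int)))])
    else pvBLoop words n (i + 1) out
  else out
termination_by n - i
decreasing_by · omega
              · omega

def extract_query_entities_alt (query : String) : List String :=
  let words := PySem.Str.split₀ query
  pvBLoop words words.length 0 []

-- ===== PRECONDITION & SPEC =====
def Spec_extract_query_entities (query : String) (out : List String) : Prop := out = extract_query_entities_alt query
instance (query : String) (out : List String) : Decidable (Spec_extract_query_entities query out) := by unfold Spec_extract_query_entities; infer_instance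

-- ===== CLAIM (what is proved, stated in full; the proofs are below) =====
def Claim_equal_extract_query_entities : Prop := ∀ (query : String), Dom_extract_query_entities query → Spec_extract_query_entities query (extract_query_entities query)

-- ===== LEMMAS AND PROOFS =====

-- canonical run decomposition both ports are reduced to
def pvCanon : List String → List String
  | [] => []
  | w :: ws =>
    if pvUpperFirst w then
      PySem.Str.join " " (w :: ws.takeWhile pvUpperFirst) :: pvCanon (ws.dropWhile pvUpperFirst)
    else pvCanon ws
termination_by l => l.length
decreasing_by · exact Nat.lt_succ_of_le (List.length_dropWhile_le _ _)
              · simp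

def pvFlush (cur : List String) : List String :=
  if cur = [] then [] else [PySem.Str.join " " cur]

def pvFinish (p : List String × List String) : List String :=
  if p.2 ≠ [] then p.1 ++ [PySem.Str.join " " p.2] else p.1

theorem pv_dropWhile_eq_drop (p : String → Bool) (l : List String) :
    l.dropWhile p = l.drop (l.takeWhile p).length := by
  have h := List.takeWhile_append_dropWhile (p := p) (l := l)
  calc l.dropWhile p = ((l.takeWhile p ++ l.dropWhile p).drop (l.takeWhile p).length) := List.drop_left.symm
    _ = l.drop (l.takeWhile p).length := by rw [h]

theorem pv_takeWhile_eq_take (p : String → Bool) (l : List String) :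
    l.takeWhile p = l.take (l.takeWhile p).length := by
  have h := List.takeWhile_append_dropWhile (p := p) (l := l)
  calc l.takeWhile p = ((l.takeWhile p ++ l.dropWhile p).take (l.takeWhile p).length) := List.take_left.symm
    _ = l.take (l.takeWhile p).length := by rw [h]

theorem pvCanon_flush (ws : List String) :
    pvCanon ws = pvFlush (ws.takeWhile pvUpperFirst) ++ pvCanon (ws.dropWhile pvUpperFirst) := by
  cases ws with
  | nil => simp [pvCanon, pvFlush]
  | cons w ws =>
    cases hu : pvUpperFirst w with
    | true => simp [pvCanon, hu, pvFlush]
    | false => simp [pvCanon, hu, pvFlush]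

theorem pvALoop_canon (ws : List String) : ∀ ents cur,
    pvFinish (pvALoop ws ents cur)
    = ents ++ pvFlush (cur ++ ws.takeWhile pvUpperFirst) ++ pvCanon (ws.dropWhile pvUpperFirst) := by
  induction ws with
  | nil =>
    intro ents cur
    cases cur <;> simp [pvALoop, pvFinish, pvCanon, pvFlush]
  | cons w ws ih =>
    intro ents cur
    cases hu : pvUpperFirst w with
    | true =>
      simp only [pvALoop, hu, if_true, List.takeWhile_cons, List.dropWhile_cons]
      rw [ih]
      simp
    | false =>
      by_cases hc : cur = []
      · subst hc
        simp only [pvALoop, hu, Bool.false_eq_true, if_false, ne_eq, not_true_eq_false,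
          List.takeWhile_cons, List.dropWhile_cons]
        rw [ih]
        have h1 : pvCanon (w :: ws) = pvFlush (ws.takeWhile pvUpperFirst) ++ pvCanon (ws.dropWhile pvUpperFirst) := by
          rw [show pvCanon (w :: ws) = pvCanon ws by rw [pvCanon]; simp [hu], pvCanon_flush ws]
        rw [h1]
        simp [pvFlush]
      · simp only [pvALoop, hu, Bool.false_eq_true, if_false, ne_eq, hc, not_false_eq_true,
          ite_true, List.takeWhile_cons, List.dropWhile_cons]
        rw [ih]
        have h1 : pvCanon (w :: ws) = pvCanon ws := by rw [pvCanon]; simp [hu]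
        rw [pvCanon_flush ws] at h1
        simp [pvFlush, hc, h1]

theorem pvRunEnd_spec (words : List String) (j : Nat) (hj : j ≤ words.length) :
    pvRunEnd words words.length j = j + ((words.drop j).takeWhile pvUpperFirst).length := by
  by_cases hlt : j < words.length
  · have hdrop : words.drop j = words[j] :: words.drop (j + 1) := List.drop_eq_getElem_cons hlt
    have hget : words.getD j "" = words[j] := by
      simp [List.getD, List.getElem?_eq_getElem hlt]
    cases hu : pvUpperFirst words[j] with
    | true =>
      rw [pvRunEnd, if_pos ⟨hlt, by rw [hget]; exact hu⟩,
        pvRunEnd_spec words (j + 1) (by omega), hdrop, List.takeWhile_cons, if_pos hu]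
      simp; omega
    | false =>
      rw [pvRunEnd, if_neg (by rw [hget]; simp [hu]), hdrop, List.takeWhile_cons, if_neg (by simp [hu])]
      simp
  · have : j = words.length := by omega
    subst this
    rw [pvRunEnd, if_neg (by simp)]
    simp
termination_by words.length - j

theorem pvBLoop_canon (words : List String) (i : Nat) : ∀ out,
    pvBLoop words words.length i out = out ++ pvCanon (words.drop i) := by
  intro out
  by_cases hlt : i < words.length
  · have hdrop : words.drop i = words[i] :: words.drop (i + 1) := List.drop_eq_getElem_cons hlt
    have hre := pvRunEnd_spec words i (by omega)
    set t := (words.drop i).takeWhile pvUpperFirst with ht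
    cases hu : pvUpperFirst words[i] with
    | true =>
      have htne : t = words[i] :: ((words.drop (i + 1)).takeWhile pvUpperFirst) := by
        rw [ht, hdrop, List.takeWhile_cons, if_pos hu]
      have hjgt : i < pvRunEnd words words.length i := by rw [hre, htne]; simp
      have hslice : PySem.List.slice words (some (i : Int)) (some ((i + t.length : Nat) : Int)) = t := by
        rw [PySem.List.slice_toNat]
        simp only [Int.toNat_natCast]
        have h1 : i + t.length - i = t.length := by omega
        rw [h1, ht]
        exact (pv_takeWhile_eq_take _ _).symm
        all_goals positivity
      have hdropj : words.drop (i + t.length) = (words.drop i).dropWhile pvUpperFirst := by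
        rw [pv_dropWhile_eq_drop, ← ht, List.drop_drop, Nat.add_comm]
      rw [pvBLoop, dif_pos hlt, dif_pos (hre ▸ hjgt : i < pvRunEnd words words.length i),
        hre, pvBLoop_canon, hslice, hdropj]
      have hcanon : pvCanon (words.drop i) =
          PySem.Str.join " " t :: pvCanon ((words.drop i).dropWhile pvUpperFirst) := by
        conv_lhs => rw [hdrop, pvCanon]
        rw [if_pos hu, htne]
        congr 1
        rw [hdrop, List.dropWhile_cons, if_pos hu]
      rw [hcanon]
      simp
    | false =>
      have hj : pvRunEnd words words.length i = i := by
        rw [hre, ht, hdrop, List.takeWhile_cons, if_neg (by simp [hu])]; simp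
      rw [pvBLoop, dif_pos hlt, dif_neg (by omega), pvBLoop_canon]
      have : pvCanon (words.drop i) = pvCanon (words.drop (i + 1)) := by
        rw [hdrop, pvCanon]; simp [hu]
      rw [this]
  · rw [pvBLoop, dif_neg hlt, List.drop_eq_nil_of_le (by omega), pvCanon]
    simp
termination_by words.length - i
decreasing_by all_goals omega

-- ===== VERDICT (by name: the statement is the Claim_ definition above) =====
theorem extract_query_entities_spec : Claim_equal_extract_query_entities := by
  intro query _
  unfold Spec_extract_query_entities extract_query_entities extract_query_entities_alt
  rw [pvBLoop_canon]
  have hA := pvALoop_canon (PySem.Str.split₀ query) [] []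
  simp only [List.nil_append] at hA
  show pvFinish (pvALoop (PySem.Str.split₀ query) [] []) = _
  rw [hA, ← pvCanon_flush]
  simp
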